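-- pv_equiv track=rewrite | github.com/practual/cartographers | game.py | greengold_plains
-- ===== SOURCE A (Python) =====
-- def _make_coord_adjacents(coord):
--     adjacents = set()
--     x, y = coord
--     if x > 0:
--         adjacents.add((x - 1, y))
--     if y > 0:
--         adjacents.add((x, y - 1))
--     if x < 10:
--         adjacents.add((x + 1, y))
--     if y < 10:
--         adjacents.add((x, y + 1))
--     return adjacents
--
-- def _greengold_plains_count_adjacent(coords_to_terrain, coord, checked_coords, terrain_found):
--     for adjacent in _make_coord_adjacents(coord):
--         if adjacent in checked_coords or adjacent not in coords_to_terrain: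
--             continue
--         checked_coords.add(adjacent)
--         if coords_to_terrain[adjacent] == 'village':
--             _greengold_plains_count_adjacent(coords_to_terrain, adjacent, checked_coords, terrain_found)
--         else:
--             terrain_found.add(coords_to_terrain[adjacent])
--
-- def greengold_plains(coords_to_terrain, terrain_to_coords):
--     score = 0
--     checked_coords = set()
--     for village_space in terrain_to_coords['village']:
--         if village_space in checked_coords:
--             continue
--         terrain_found = set()
--         _greengold_plains_count_adjacent(coords_to_terrain, village_space, checked_coords, terrain_found)
--         if len(terrain_found) >= 3:
--             score += 3
--     return score
-- ===== SOURCE B (Python) =====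
-- def _neighbour_list(coord):
--     x, y = coord
--     out = []
--     if x > 0:
--         out.append((x - 1, y))
--     if y > 0:
--         out.append((x, y - 1))
--     if x < 10:
--         out.append((x + 1, y))
--     if y < 10:
--         out.append((x, y + 1))
--     return out
--
-- def greengold_plains(coords_to_terrain, terrain_to_coords):
--     score = 0
--     checked_coords = set()
--     for village_space in terrain_to_coords['village']:
--         if village_space in checked_coords:
--             continue
--         terrain_found = set()
--         # iterative DFS: explicit stack of pending neighbour lists
--         stack = [_neighbour_list(village_space)]
--         while stack:
--             pending = stack[-1]
--             if not pending:
--                 stack.pop()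
--                 continue
--             adjacent = pending.pop(0)
--             if adjacent in checked_coords or adjacent not in coords_to_terrain:
--                 continue
--             checked_coords.add(adjacent)
--             terrain = coords_to_terrain[adjacent]
--             if terrain == 'village':
--                 stack.append(_neighbour_list(adjacent))
--             else:
--                 terrain_found.add(terrain)
--         if len(terrain_found) >= 3:
--             score += 3
--     return score
-- ===== Notes on version B (the rewrite author's own statement) =====
-- stated objective: alternative
-- what changed: The recursive flood fill over village clusters is replaced by an iterative DFS driven by an explicit stack of pending neighbour lists (no recursion, one while loop); the outer per-seed scoring loop is kept; Pre_ excludes only the inputs without a 'village' key, on which both A and B raise KeyError.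
import Mathlib
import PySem

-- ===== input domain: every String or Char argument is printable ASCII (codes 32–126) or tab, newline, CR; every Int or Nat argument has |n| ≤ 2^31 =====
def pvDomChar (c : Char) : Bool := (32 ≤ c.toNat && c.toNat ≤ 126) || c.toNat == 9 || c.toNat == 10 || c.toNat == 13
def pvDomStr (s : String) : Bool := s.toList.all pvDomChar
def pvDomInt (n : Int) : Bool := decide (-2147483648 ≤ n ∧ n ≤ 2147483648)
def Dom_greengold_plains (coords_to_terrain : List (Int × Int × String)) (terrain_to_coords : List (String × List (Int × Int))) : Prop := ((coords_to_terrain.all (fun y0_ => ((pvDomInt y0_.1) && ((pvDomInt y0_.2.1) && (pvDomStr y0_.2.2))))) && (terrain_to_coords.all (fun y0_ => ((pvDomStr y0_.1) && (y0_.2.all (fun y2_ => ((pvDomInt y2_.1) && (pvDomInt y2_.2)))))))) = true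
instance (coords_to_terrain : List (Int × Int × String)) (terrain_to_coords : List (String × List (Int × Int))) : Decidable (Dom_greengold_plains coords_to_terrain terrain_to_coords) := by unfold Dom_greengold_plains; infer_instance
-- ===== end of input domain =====

-- B replaces A's recursive flood fill by an iterative one driven by an explicit stack of
-- pending neighbour lists (same final sets, no recursion); equivalence is on the return value.

-- ===== PORT A =====
-- _make_coord_adjacents: the set literal is iterated only for order-insensitive set updates,
-- so a fixed insertion-order list is exact.
def pvAdj (c : Int × Int) : List (Int × Int) :=
  (if 0 < c.1 then [(c.1 - 1, c.2)] else []) ++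
  (if 0 < c.2 then [(c.1, c.2 - 1)] else []) ++
  (if c.1 < 10 then [(c.1 + 1, c.2)] else []) ++
  (if c.2 < 10 then [(c.1, c.2 + 1)] else [])

-- 'coord in coords_to_terrain' / 'coords_to_terrain[coord]': first-match lookup in the
-- association list (dict under the type convention); exact, hand-rolled because the key is the pair (x, y).
def pvLookup (ctt : List (Int × Int × String)) (c : Int × Int) : Option String :=
  match ctt with
  | [] => none
  | (x, y, t) :: rest => if x = c.1 ∧ y = c.2 then some t else pvLookup rest c

-- _greengold_plains_count_adjacent: the for-loop over the adjacents, with the recursive call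
-- inlined at the 'village' branch. The Nat argument is a pure totality guard (recursion fuel):
-- each nested call first adds a fresh key of ctt to checked, so nesting depth never exceeds
-- ctt.length and the 0-branch is unreachable from the initial fuel used below.
def pvAgo (ctt : List (Int × Int × String)) :
    Nat → List (Int × Int) → PySem.Set (Int × Int) × PySem.Set String →
    PySem.Set (Int × Int) × PySem.Set String
  | _, [], st => st
  | f, a :: l, st =>
    if PySem.Set.contains st.1 a then pvAgo ctt f l st
    else match pvLookup ctt a with
      | none => pvAgo ctt f l st
      | some t =>
        if t = "village" then
          match f with
          | 0 => pvAgo ctt 0 l (PySem.Set.add st.1 a, st.2)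
          | Nat.succ f' => pvAgo ctt (f' + 1) l (pvAgo ctt f' (pvAdj a) (PySem.Set.add st.1 a, st.2))
        else pvAgo ctt f l (PySem.Set.add st.1 a, PySem.Set.add st.2 t)
  termination_by f l _ => (f, l.length)

def greengold_plains (coords_to_terrain : List (Int × Int × String)) (terrain_to_coords : List (String × List (Int × Int))) : Int :=
  match PySem.Dict.get? (PySem.Dict.mk terrain_to_coords) "village" with
  | none => 0  -- Python raises KeyError here; excluded by Pre_
  | some villages =>
    (villages.foldl
      (fun (acc : Int × PySem.Set (Int × Int)) v =>
        if PySem.Set.contains acc.2 v then acc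
        else
          let st := pvAgo coords_to_terrain coords_to_terrain.length (pvAdj v) (acc.2, PySem.Set.empty)
          (acc.1 + (if 3 ≤ PySem.Set.len st.2 then 3 else 0), st.1))
      ((0 : Int), (PySem.Set.empty : PySem.Set (Int × Int)))).1

-- ===== PORT B =====
-- used by pvBrun's termination argument
theorem pvAdj_len (c : Int × Int) : (pvAdj c).length ≤ 4 := by
  unfold pvAdj; split_ifs <;> simp


-- measure for pvBrun's termination argument
def pvM (stack : List (Nat × List (Int × Int))) : Nat :=
  stack.foldr (fun e acc => 6 ^ e.1 * (e.2.length + 1) + acc) 0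

theorem pvM_pop (f : Nat) (rest : List (Nat × List (Int × Int))) : pvM rest < pvM ((f, []) :: rest) := by
  have h : 0 < 6 ^ f := Nat.pow_pos (by norm_num)
  simp [pvM]

theorem pvM_tail (f : Nat) (a : Int × Int) (l : List (Int × Int)) (rest : List (Nat × List (Int × Int))) :
    pvM ((f, l) :: rest) < pvM ((f, a :: l) :: rest) := by
  have h : 0 < 6 ^ f := Nat.pow_pos (by norm_num)
  simp [pvM, Nat.mul_add]

theorem pvM_push (f : Nat) (a : Int × Int) (l : List (Int × Int)) (rest : List (Nat × List (Int × Int))) :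
    pvM ((f, pvAdj a) :: (f + 1, l) :: rest) < pvM ((f + 1, a :: l) :: rest) := by
  have h : 0 < 6 ^ f := Nat.pow_pos (by norm_num)
  have h4 : (pvAdj a).length ≤ 4 := pvAdj_len a
  simp [pvM, Nat.mul_add, pow_succ]; nlinarith

-- the 'while stack:' loop of Source B; a stack entry is one pending neighbour list
-- (paired with the same totality fuel as in port A, spent when a village cell is expanded).
def pvBrun (ctt : List (Int × Int × String)) :
    List (Nat × List (Int × Int)) → PySem.Set (Int × Int) × PySem.Set String →
    PySem.Set (Int × Int) × PySem.Set String
  | [], st => st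
  | (_, []) :: rest, st => pvBrun ctt rest st
  | (f, a :: l) :: rest, st =>
    if PySem.Set.contains st.1 a then pvBrun ctt ((f, l) :: rest) st
    else match pvLookup ctt a with
      | none => pvBrun ctt ((f, l) :: rest) st
      | some t =>
        if t = "village" then
          match f with
          | 0 => pvBrun ctt ((0, l) :: rest) (PySem.Set.add st.1 a, st.2)
          | Nat.succ f' => pvBrun ctt ((f', pvAdj a) :: (f' + 1, l) :: rest) (PySem.Set.add st.1 a, st.2)
        else pvBrun ctt ((f, l) :: rest) (PySem.Set.add st.1 a, PySem.Set.add st.2 t)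
  termination_by stack _ => pvM stack
  decreasing_by
    all_goals first
      | exact pvM_pop _ _
      | exact pvM_tail _ _ _ _
      | exact pvM_push _ _ _ _

def greengold_plains_alt (coords_to_terrain : List (Int × Int × String)) (terrain_to_coords : List (String × List (Int × Int))) : Int :=
  match PySem.Dict.get? (PySem.Dict.mk terrain_to_coords) "village" with
  | none => 0  -- Python raises KeyError here; excluded by Pre_
  | some villages =>
    (villages.foldl
      (fun (acc : Int × PySem.Set (Int × Int)) v =>
        if PySem.Set.contains acc.2 v then acc
        else
          let st := pvBrun coords_to_terrain [(coords_to_terrain.length, pvAdj v)] (acc.2, PySem.Set.empty)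
          (acc.1 + (if 3 ≤ PySem.Set.len st.2 then 3 else 0), st.1))
      ((0 : Int), (PySem.Set.empty : PySem.Set (Int × Int)))).1

-- ===== PRECONDITION & SPEC =====
-- Pre_ excludes exactly the inputs with no 'village' key in terrain_to_coords, on which the Python A raises KeyError.
def Pre_greengold_plains (coords_to_terrain : List (Int × Int × String)) (terrain_to_coords : List (String × List (Int × Int))) : Prop :=
  "village" ∈ terrain_to_coords.map Prod.fst
instance (coords_to_terrain : List (Int × Int × String)) (terrain_to_coords : List (String × List (Int × Int))) : Decidable (Pre_greengold_plains coords_to_terrain terrain_to_coords) := by unfold Pre_greengold_plains; infer_instance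

def pvWitness_greengold_plains : (List (Int × Int × String)) × (List (String × List (Int × Int))) :=
  ([(0, 1, "forest"), (1, 0, "water"), (1, 2, "farm"), (1, 1, "village")], [("village", [(1, 1)])])

def Spec_greengold_plains (coords_to_terrain : List (Int × Int × String)) (terrain_to_coords : List (String × List (Int × Int))) (out : Int) : Prop := out = greengold_plains_alt coords_to_terrain terrain_to_coords
instance (coords_to_terrain : List (Int × Int × String)) (terrain_to_coords : List (String × List (Int × Int))) (out : Int) : Decidable (Spec_greengold_plains coords_to_terrain terrain_to_coords out) := by unfold Spec_greengold_plains; infer_instance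

-- ===== CLAIM (what is proved, stated in full; the proofs are below) =====
def Claim_equal_greengold_plains : Prop := ∀ (coords_to_terrain : List (Int × Int × String)) (terrain_to_coords : List (String × List (Int × Int))), Dom_greengold_plains coords_to_terrain terrain_to_coords → Pre_greengold_plains coords_to_terrain terrain_to_coords → Spec_greengold_plains coords_to_terrain terrain_to_coords (greengold_plains coords_to_terrain terrain_to_coords)

-- ===== LEMMAS AND PROOFS =====

-- lockstep simulation: running the stack machine on one pending list on top of the stack
-- is running A's recursive loop on that list first.
theorem pvBrun_cons (ctt : List (Int × Int × String)) (f : Nat) (l : List (Int × Int))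
    (rest : List (Nat × List (Int × Int))) (st : PySem.Set (Int × Int) × PySem.Set String) :
    pvBrun ctt ((f, l) :: rest) st = pvBrun ctt rest (pvAgo ctt f l st) := by
  induction f, l, st using pvAgo.induct ctt generalizing rest with
  | case1 f st => simp only [pvBrun, pvAgo]
  | case2 f a l st hc ih =>
      rw [pvBrun.eq_def, pvAgo.eq_def]
      simp only [hc, if_true]
      exact ih rest
  | case3 f a l st hc hn ih =>
      rw [pvBrun.eq_def, pvAgo.eq_def]
      simp only [hc, hn, if_false, Bool.false_eq_true]
      exact ih rest
  | case4 a l st hc hv ih =>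
      rw [pvBrun.eq_def, pvAgo.eq_def]
      simp only [hc, hv, if_false, Bool.false_eq_true, if_true]
      exact ih rest
  | case5 a l st hc f' hv ihA ihL =>
      rw [pvBrun.eq_def, pvAgo.eq_def]
      simp only [hc, hv, if_false, Bool.false_eq_true, if_true]
      rw [ihA, ihL]
  | case6 f a l st hc t hl hne ih =>
      rw [pvBrun.eq_def, pvAgo.eq_def]
      simp only [hc, hl, hne, if_false, Bool.false_eq_true]
      exact ih rest

theorem pvBrun_single (ctt : List (Int × Int × String)) (f : Nat) (l : List (Int × Int))
    (st : PySem.Set (Int × Int) × PySem.Set String) :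
    pvBrun ctt [(f, l)] st = pvAgo ctt f l st := by
  rw [pvBrun_cons]; simp [pvBrun]

-- ===== VERDICT (by name: the statement is the Claim_ definition above) =====
theorem greengold_plains_spec : Claim_equal_greengold_plains := by
  intro ctt ttc _dom _pre
  unfold Spec_greengold_plains greengold_plains greengold_plains_alt
  cases PySem.Dict.get? (PySem.Dict.mk ttc) "village" with
  | none => rfl
  | some villages =>
    simp only [pvBrun_single]
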